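-- pv_equiv track=rewrite | github.com/ebiram63/Git_quera | offering_music.py | query_city_genre
-- ===== SOURCE A (Python) =====
-- def query_city_genre(city: str, genre: str, all_users: dict, all_albums: dict) -> int:
--     # Count the albums of the specified genre for users from the given city
--     genre_album_count = 0
--
--     # Loop through each user in all_users
--     for username, user_info in all_users.items():
--         # Check if the user's city matches the specified city
--         if user_info['city'] == city:
--             # Check if the user has albums in the all_albums dictionary
--             if username in all_albums:
--                 # Count the albums of the specified genre for this user
--                 for album in all_albums[username]:
--                     if album['genre'] == genre:
--                         genre_album_count += 1
--
--     return genre_album_count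
-- ===== SOURCE B (Python) =====
-- def query_city_genre(city: str, genre: str, all_users: dict, all_albums: dict) -> int:
--     # Group-by aggregation: tally every album entry under the key
--     # (owner's city, album genre), then answer with a single table lookup.
--     table = {}
--     for username, albums in all_albums.items():
--         owner_city = all_users.get(username, {}).get('city')
--         for album in albums:
--             key = (owner_city, album.get('genre'))
--             table[key] = table.get(key, 0) + 1
--     return table.get((city, genre), 0)
-- ===== Notes on version B (the rewrite author's own statement) =====
-- stated objective: alternative
-- what changed: B replaces A's filtered nested scan (loop users, look each up in all_albums, count inline) by a group-by aggregation: one pass tallies every album entry into a dict keyed by (owner's city, album genre), and the answer is a single lookup of that table at (city, genre).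
import Mathlib
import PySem

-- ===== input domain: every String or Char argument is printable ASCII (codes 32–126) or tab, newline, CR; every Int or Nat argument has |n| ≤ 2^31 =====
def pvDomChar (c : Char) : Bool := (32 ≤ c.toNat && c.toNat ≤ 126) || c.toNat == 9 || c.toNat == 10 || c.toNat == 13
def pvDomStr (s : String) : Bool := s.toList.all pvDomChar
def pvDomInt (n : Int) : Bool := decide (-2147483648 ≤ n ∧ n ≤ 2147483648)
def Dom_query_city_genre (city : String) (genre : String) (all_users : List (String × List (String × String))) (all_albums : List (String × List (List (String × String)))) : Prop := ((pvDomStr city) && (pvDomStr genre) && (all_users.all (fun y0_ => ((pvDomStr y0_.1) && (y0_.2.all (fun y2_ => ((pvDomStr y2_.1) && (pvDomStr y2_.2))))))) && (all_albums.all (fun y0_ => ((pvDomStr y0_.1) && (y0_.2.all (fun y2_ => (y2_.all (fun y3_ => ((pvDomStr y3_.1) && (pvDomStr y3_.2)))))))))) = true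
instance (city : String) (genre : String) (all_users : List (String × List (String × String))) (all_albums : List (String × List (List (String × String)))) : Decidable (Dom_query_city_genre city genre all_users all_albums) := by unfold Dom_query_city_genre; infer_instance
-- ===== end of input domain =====

-- B replaces A's filtered nested scan by a group-by aggregation: one pass tallies every album
-- entry into a table keyed by (owner's city, album genre); the answer is one table lookup
-- (alternative decomposition; same asymptotic cost).

-- shared accessors for A: info['city'] == city and album['genre'] == genre
-- (KeyError modeled by getD with a default; exact under Pre_, which requires the keys present)
def pvCityIs (city : String) (info : List (String × String)) : Bool :=
  (PySem.Dict.mk info).getD "city" "" == city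

def pvGenreIs (genre : String) (album : List (String × String)) : Bool :=
  (PySem.Dict.mk album).getD "genre" "" == genre

-- ===== PORT A =====
def query_city_genre (city : String) (genre : String) (all_users : List (String × List (String × String))) (all_albums : List (String × List (List (String × String)))) : Int :=
  all_users.foldl
    (fun genre_album_count p =>
      if pvCityIs city p.2 then
        if (PySem.Dict.mk all_albums).contains p.1 then
          ((PySem.Dict.mk all_albums).getD p.1 []).foldl
            (fun c album => if pvGenreIs genre album then c + 1 else c)
            genre_album_count
        else genre_album_count
      else genre_album_count)
    0

-- ===== PORT B =====
-- all_users.get(username, {}).get('city')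
def pvOwnerCity (all_users : List (String × List (String × String))) (username : String) : Option String :=
  (PySem.Dict.mk ((PySem.Dict.mk all_users).getD username [])).get? "city"

def query_city_genre_alt (city : String) (genre : String) (all_users : List (String × List (String × String))) (all_albums : List (String × List (List (String × String)))) : Int :=
  let table : PySem.Dict (Option String × Option String) Int :=
    all_albums.foldl
      (fun tbl q =>
        let owner_city := pvOwnerCity all_users q.1
        q.2.foldl
          (fun t album =>
            t.insert (owner_city, (PySem.Dict.mk album).get? "genre")
              (t.getD (owner_city, (PySem.Dict.mk album).get? "genre") 0 + 1))
          tbl)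
      (PySem.Dict.mk [])
  table.getD (some city, some genre) 0

-- ===== PRECONDITION & SPEC =====
-- Pre_ excludes association lists with duplicate keys (they do not correspond to a Python
-- dict, so A's first-match value there is accidental) and inputs where some user record
-- lacks 'city' or an album of a user from the city lacks 'genre' (A raises KeyError there).
def pvNoDup : List String → Bool
  | [] => true
  | x :: xs => !(xs.contains x) && pvNoDup xs

def Pre_query_city_genre (city : String) (genre : String) (all_users : List (String × List (String × String))) (all_albums : List (String × List (List (String × String)))) : Prop :=
  (pvNoDup (all_users.map Prod.fst) &&
   pvNoDup (all_albums.map Prod.fst) &&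
   all_users.all (fun p => pvNoDup (p.2.map Prod.fst) && (p.2.map Prod.fst).contains "city") &&
   all_albums.all (fun q =>
     !((all_users.filter (fun p => pvCityIs city p.2)).map Prod.fst).contains q.1 ||
     q.2.all (fun alb => pvNoDup (alb.map Prod.fst) && (alb.map Prod.fst).contains "genre"))) = true
instance (city : String) (genre : String) (all_users : List (String × List (String × String))) (all_albums : List (String × List (List (String × String)))) : Decidable (Pre_query_city_genre city genre all_users all_albums) := by unfold Pre_query_city_genre; infer_instance

def pvWitness_query_city_genre : String × String × (List (String × List (String × String))) × (List (String × List (List (String × String)))) :=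
  ("Paris", "rock", [("u1", [("city", "Paris")]), ("u2", [("city", "Lyon")])], [("u1", [[("genre", "rock")], [("genre", "jazz")]])])

def Spec_query_city_genre (city : String) (genre : String) (all_users : List (String × List (String × String))) (all_albums : List (String × List (List (String × String)))) (out : Int) : Prop := out = query_city_genre_alt city genre all_users all_albums
instance (city : String) (genre : String) (all_users : List (String × List (String × String))) (all_albums : List (String × List (List (String × String)))) (out : Int) : Decidable (Spec_query_city_genre city genre all_users all_albums out) := by unfold Spec_query_city_genre; infer_instance

-- ===== CLAIM (what is proved, stated in full; the proofs are below) =====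
def Claim_equal_query_city_genre : Prop := ∀ (city : String) (genre : String) (all_users : List (String × List (String × String))) (all_albums : List (String × List (List (String × String)))), Dom_query_city_genre city genre all_users all_albums → Pre_query_city_genre city genre all_users all_albums → Spec_query_city_genre city genre all_users all_albums (query_city_genre city genre all_users all_albums)

-- ===== LEMMAS AND PROOFS =====

theorem pv_noDup_iff (l : List String) : pvNoDup l = true ↔ l.Nodup := by
  induction l with
  | nil => simp [pvNoDup]
  | cons x xs ih => simp [pvNoDup, List.nodup_cons, ih]

-- proof-side abbreviations
def pvCnt (genre : String) (albs : List (List (String × String))) : Int :=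
  ((albs.countP (pvGenreIs genre) : Nat) : Int)

def pvCityList (city : String) (users : List (String × List (String × String))) : List String :=
  (users.filter (fun p => pvCityIs city p.2)).map Prod.fst

def pvFA (city : String) (genre : String) (bs : List (String × List (List (String × String)))) (p : String × List (String × String)) : Int :=
  if pvCityIs city p.2 then
    (if (PySem.Dict.mk bs).contains p.1 then pvCnt genre ((PySem.Dict.mk bs).getD p.1 []) else 0)
  else 0

theorem pv_getD_mk_cons {kappa nu : Type} [BEq kappa] (k : kappa) (v : nu) (rest : List (kappa × nu)) (x : kappa) (d0 : nu) :
    (PySem.Dict.mk ((k, v) :: rest)).getD x d0 = if k == x then v else (PySem.Dict.mk rest).getD x d0 := by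
  rw [PySem.Dict.getD_eq_get?_getD, PySem.Dict.get?_mk_cons]
  split <;> simp [PySem.Dict.getD_eq_get?_getD]

theorem pv_contains_mk_cons {kappa nu : Type} [BEq kappa] (k : kappa) (v : nu) (rest : List (kappa × nu)) (x : kappa) :
    (PySem.Dict.mk ((k, v) :: rest)).contains x = (k == x || (PySem.Dict.mk rest).contains x) := by
  rw [PySem.Dict.contains_eq_isSome_get?, PySem.Dict.contains_eq_isSome_get?, PySem.Dict.get?_mk_cons]
  cases h : k == x <;> simp

theorem pv_contains_mk_nil {nu : Type} (x : String) :
    (PySem.Dict.mk ([] : List (String × nu))).contains x = false := by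
  cases h : (PySem.Dict.mk ([] : List (String × nu))).contains x
  · rfl
  · have hm := (PySem.Dict.contains_iff_mem_keys _ _).mp h
    simp [PySem.Dict.keys] at hm

theorem pv_contains_mk_eq_false_of_not_mem {nu : Type} (bs : List (String × nu)) (x : String)
    (h : x ∉ bs.map Prod.fst) : (PySem.Dict.mk bs).contains x = false := by
  cases hc : (PySem.Dict.mk bs).contains x
  · rfl
  · have hm := (PySem.Dict.contains_iff_mem_keys _ _).mp hc
    simp only [PySem.Dict.keys] at hm
    exact absurd hm h

theorem pv_sum_map_add {alpha : Type} (l : List alpha) (f g : alpha → Int) :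
    (l.map (fun x => f x + g x)).sum = (l.map f).sum + (l.map g).sum := by
  induction l with
  | nil => simp
  | cons a tl ih => simp [ih]; ring

theorem pv_cityList_subset (city : String) (users : List (String × List (String × String))) (x : String)
    (h : x ∈ pvCityList city users) : x ∈ users.map Prod.fst := by
  simp only [pvCityList, List.mem_map] at h
  obtain ⟨p, hp, rfl⟩ := h
  exact List.mem_map_of_mem (List.mem_of_mem_filter hp)

theorem pv_cityList_cons (city : String) (p0 : String × List (String × String)) (tl : List (String × List (String × String))) :
    pvCityList city (p0 :: tl) = if pvCityIs city p0.2 then p0.1 :: pvCityList city tl else pvCityList city tl := by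
  simp only [pvCityList, List.filter_cons]
  split <;> simp

theorem pv_sum_indicator (city u : String) (c : Int) (users : List (String × List (String × String)))
    (hnd : (users.map Prod.fst).Nodup) :
    (users.map (fun p => if p.1 = u ∧ pvCityIs city p.2 = true then c else 0)).sum
      = if u ∈ pvCityList city users then c else 0 := by
  induction users with
  | nil => simp [pvCityList]
  | cons p0 tl ih =>
    simp only [List.map_cons, List.nodup_cons] at hnd
    obtain ⟨h0, htl⟩ := hnd
    simp only [List.map_cons, List.sum_cons, ih htl, pv_cityList_cons]
    by_cases hu : p0.1 = u
    · have hnotin : u ∉ pvCityList city tl := fun hm => h0 (hu ▸ pv_cityList_subset city tl u hm)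
      by_cases hc : pvCityIs city p0.2 = true <;> simp [hu, hc, hnotin]
    · have hne : u ≠ p0.1 := fun h => hu h.symm
      by_cases hc : pvCityIs city p0.2 = true <;> simp [hu, hc, hne]

theorem pv_main (city genre : String) (users : List (String × List (String × String)))
    (hu : (users.map Prod.fst).Nodup) :
    ∀ (bs : List (String × List (List (String × String)))), (bs.map Prod.fst).Nodup →
      (users.map (pvFA city genre bs)).sum
        = (bs.map (fun q => if q.1 ∈ pvCityList city users then pvCnt genre q.2 else 0)).sum := by
  intro bs
  induction bs with
  | nil =>
    intro _
    simp only [List.map_nil, List.sum_nil]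
    refine List.sum_eq_zero ?_
    intro x hx
    rw [List.mem_map] at hx
    obtain ⟨p, _, rfl⟩ := hx
    unfold pvFA
    rw [pv_contains_mk_nil]
    simp
  | cons b rest ih =>
    intro hnd
    simp only [List.map_cons, List.nodup_cons] at hnd
    obtain ⟨h0, htl⟩ := hnd
    have hstep : ∀ p ∈ users, pvFA city genre (b :: rest) p
        = pvFA city genre rest p + (if p.1 = b.1 ∧ pvCityIs city p.2 = true then pvCnt genre b.2 else 0) := by
      intro p _
      unfold pvFA
      by_cases he : p.1 = b.1
      · have hb : (b.1 == p.1) = true := beq_iff_eq.mpr he.symm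
        have hcrest : (PySem.Dict.mk rest).contains p.1 = false :=
          pv_contains_mk_eq_false_of_not_mem rest p.1 (he ▸ h0)
        rw [show (b :: rest) = ((b.1, b.2) :: rest) from rfl, pv_contains_mk_cons, pv_getD_mk_cons,
          hb, hcrest, Bool.true_or]
        simp only [he, true_and, if_neg Bool.false_ne_true]
        by_cases hc : pvCityIs city p.2 = true
        · simp [hc]
        · simp [hc]
      · have hb : (b.1 == p.1) = false := beq_eq_false_iff_ne.mpr (fun h => he h.symm)
        rw [show (b :: rest) = ((b.1, b.2) :: rest) from rfl, pv_contains_mk_cons, pv_getD_mk_cons,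
          hb, Bool.false_or]
        rw [if_neg Bool.false_ne_true, if_neg (fun h : p.1 = b.1 ∧ _ => he h.1)]
        ring
    rw [List.map_congr_left hstep, pv_sum_map_add, ih htl,
      pv_sum_indicator city b.1 (pvCnt genre b.2) users hu]
    simp only [List.map_cons, List.sum_cons]
    ring

theorem pv_portA_eq_sum (city genre : String) (users : List (String × List (String × String)))
    (albums : List (String × List (List (String × String)))) :
    query_city_genre city genre users albums = (users.map (pvFA city genre albums)).sum := by
  suffices h : ∀ (us : List (String × List (String × String))) (acc : Int),
      List.foldl
        (fun genre_album_count p =>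
          if pvCityIs city p.2 then
            if (PySem.Dict.mk albums).contains p.1 then
              ((PySem.Dict.mk albums).getD p.1 []).foldl
                (fun c album => if pvGenreIs genre album then c + 1 else c)
                genre_album_count
            else genre_album_count
          else genre_album_count)
        acc us = acc + (us.map (pvFA city genre albums)).sum by
    exact (h users 0).trans (zero_add _)
  intro us
  induction us with
  | nil => intro acc; simp
  | cons p tl ih =>
    intro acc
    rw [List.foldl_cons, ih]
    have hstep : (if pvCityIs city p.2 then
          if (PySem.Dict.mk albums).contains p.1 then
            ((PySem.Dict.mk albums).getD p.1 []).foldl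
              (fun c album => if pvGenreIs genre album then c + 1 else c) acc
          else acc
        else acc) = acc + pvFA city genre albums p := by
      unfold pvFA
      by_cases hc : pvCityIs city p.2 = true
      · by_cases hm : (PySem.Dict.mk albums).contains p.1 = true
        · rw [if_pos hc, if_pos hm, if_pos hc, if_pos hm, PySem.List.foldl_if_add_one]
          rfl
        · rw [if_pos hc, if_neg hm, if_pos hc, if_neg hm]; ring
      · rw [if_neg hc, if_neg hc]; ring
    rw [hstep]
    simp only [List.map_cons, List.sum_cons]
    ring


-- ---- B side: the aggregation table counts key occurrences ----

def pvKeyOf (users : List (String × List (String × String))) (u : String)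
    (alb : List (String × String)) : Option String × Option String :=
  (pvOwnerCity users u, (PySem.Dict.mk alb).get? "genre")

def pvKeys (users : List (String × List (String × String)))
    (albums : List (String × List (List (String × String)))) : List (Option String × Option String) :=
  albums.flatMap (fun q => q.2.map (pvKeyOf users q.1))

theorem pv_contains_mk_iff {nu : Type} (l : List (String × nu)) (x : String) :
    (PySem.Dict.mk l).contains x = true ↔ x ∈ l.map Prod.fst := by
  rw [PySem.Dict.contains_iff_mem_keys]
  simp [PySem.Dict.keys]

theorem pv_get?_eq_some_getD {nu : Type} (l : List (String × nu)) (k : String) (d0 : nu)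
    (h : (PySem.Dict.mk l).contains k = true) :
    (PySem.Dict.mk l).get? k = some ((PySem.Dict.mk l).getD k d0) := by
  rw [PySem.Dict.contains_eq_isSome_get?] at h
  rw [PySem.Dict.getD_eq_get?_getD]
  cases hg : (PySem.Dict.mk l).get? k with
  | none => rw [hg] at h; simp at h
  | some v => simp

theorem pv_portB_eq_count (city genre : String) (users : List (String × List (String × String)))
    (albums : List (String × List (List (String × String)))) :
    query_city_genre_alt city genre users albums
      = (((pvKeys users albums).count (some city, some genre) : Nat) : Int) := by
  have htab : (albums.foldl
      (fun tbl q =>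
        q.2.foldl (fun t album =>
          t.insert (pvOwnerCity users q.1, (PySem.Dict.mk album).get? "genre")
            (t.getD (pvOwnerCity users q.1, (PySem.Dict.mk album).get? "genre") 0 + 1)) tbl)
      (PySem.Dict.mk ([] : List ((Option String × Option String) × Int))))
      = (pvKeys users albums).foldl (fun d x => d.insert x (d.getD x 0 + 1)) (PySem.Dict.mk []) := by
    rw [pvKeys, List.foldl_flatMap]
    congr 1
    funext tbl q
    rw [List.foldl_map]
    rfl
  simp only [query_city_genre_alt]
  rw [htab, PySem.Dict.getD_foldl_insert_add_one]
  simp [PySem.Dict.getD_eq_get?_getD, PySem.Dict.get?]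

theorem pv_count_map_keyOf (users : List (String × List (String × String))) (u : String)
    (q2 : List (List (String × String))) (city genre : String) :
    (q2.map (pvKeyOf users u)).count (some city, some genre)
      = if pvOwnerCity users u = some city then
          q2.countP (fun alb => (PySem.Dict.mk alb).get? "genre" == some genre)
        else 0 := by
  induction q2 with
  | nil => simp
  | cons a tl ih =>
    simp only [List.map_cons, List.count_cons, ih, List.countP_cons]
    by_cases ho : pvOwnerCity users u = some city
    · by_cases hg : (PySem.Dict.mk a).get? "genre" = some genre
      · have hb : (pvKeyOf users u a
            == ((some city : Option String), (some genre : Option String))) = true :=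
          beq_iff_eq.mpr (by simp [pvKeyOf, ho, hg])
        simp [hb, ho, hg]
      · have hb : (pvKeyOf users u a
            == ((some city : Option String), (some genre : Option String))) = false := by
          rw [Bool.eq_false_iff]
          intro hc
          have h2 := congrArg Prod.snd (beq_iff_eq.mp hc)
          exact hg (by simpa [pvKeyOf] using h2)
        have hgb : ((PySem.Dict.mk a).get? "genre" == some genre) = false := by
          rw [Bool.eq_false_iff]; intro hc; exact hg (beq_iff_eq.mp hc)
        simp [hb, ho, hgb]
    · have hb : (pvKeyOf users u a
          == ((some city : Option String), (some genre : Option String))) = false := by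
        rw [Bool.eq_false_iff]
        intro hc
        have h1 := congrArg Prod.fst (beq_iff_eq.mp hc)
        exact ho (by simpa [pvKeyOf] using h1)
      simp [hb, ho]

theorem pv_portB_eq_sum (city genre : String) (users : List (String × List (String × String)))
    (albums : List (String × List (List (String × String)))) :
    query_city_genre_alt city genre users albums
      = (albums.map (fun q =>
          if pvOwnerCity users q.1 = some city then
            ((q.2.countP (fun alb => (PySem.Dict.mk alb).get? "genre" == some genre) : Nat) : Int)
          else 0)).sum := by
  rw [pv_portB_eq_count]
  induction albums with
  | nil => simp [pvKeys]
  | cons q tl ih =>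
    have hkeys : pvKeys users (q :: tl) = q.2.map (pvKeyOf users q.1) ++ pvKeys users tl := by
      simp [pvKeys]
    rw [hkeys, List.count_append, List.map_cons, List.sum_cons, ← ih,
      pv_count_map_keyOf users q.1 q.2 city genre]
    by_cases ho : pvOwnerCity users q.1 = some city
    · simp [ho]
    · simp [ho]

-- under Pre_, the .get-chain owner city agrees with membership in the city list
theorem pv_owner_iff (city : String) (users : List (String × List (String × String)))
    (hu : (users.map Prod.fst).Nodup)
    (hkeys : ∀ p ∈ users, ((p.2.map Prod.fst).contains "city") = true)
    (u : String) :
    (pvOwnerCity users u = some city) ↔ u ∈ pvCityList city users := by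
  induction users with
  | nil =>
    simp only [pvOwnerCity, pvCityList, List.filter_nil, List.map_nil, List.not_mem_nil, iff_false]
    intro hc
    have : (PySem.Dict.mk ([] : List (String × List (String × String)))).getD u [] = [] := by
      simp [PySem.Dict.getD_eq_get?_getD, PySem.Dict.get?]
    rw [this] at hc
    simp [PySem.Dict.get?] at hc
  | cons p tl ih =>
    simp only [List.map_cons, List.nodup_cons] at hu
    obtain ⟨h0, htl⟩ := hu
    have hk := hkeys p (List.mem_cons_self ..)
    have hktl : ∀ r ∈ tl, ((r.2.map Prod.fst).contains "city") = true :=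
      fun r hr => hkeys r (List.mem_cons_of_mem _ hr)
    rw [pv_cityList_cons]
    by_cases he : p.1 = u
    · have hb : (p.1 == u) = true := beq_iff_eq.mpr he
      have howner : pvOwnerCity (p :: tl) u = (PySem.Dict.mk p.2).get? "city" := by
        unfold pvOwnerCity
        rw [show (p :: tl) = ((p.1, p.2) :: tl) from rfl, pv_getD_mk_cons, if_pos hb]
      have hcontains : (PySem.Dict.mk p.2).contains "city" = true :=
        (pv_contains_mk_iff p.2 "city").mpr (by
          have := hk
          rwa [List.contains_iff_mem] at this)
      rw [howner, pv_get?_eq_some_getD p.2 "city" "" hcontains]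
      have hnotin : u ∉ pvCityList city tl := fun hm =>
        h0 (he ▸ pv_cityList_subset city tl u hm)
      by_cases hc : pvCityIs city p.2 = true
      · have : (PySem.Dict.mk p.2).getD "city" "" = city := by
          have := hc; unfold pvCityIs at this; exact beq_iff_eq.mp this
        simp [this, hc, he, hnotin]
      · have hne : (PySem.Dict.mk p.2).getD "city" "" ≠ city := by
          intro h; exact hc (by unfold pvCityIs; exact beq_iff_eq.mpr h)
        simp [hc, hnotin, hne]
    · have hb : (p.1 == u) = false := beq_eq_false_iff_ne.mpr he
      have howner : pvOwnerCity (p :: tl) u = pvOwnerCity tl u := by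
        unfold pvOwnerCity
        rw [show (p :: tl) = ((p.1, p.2) :: tl) from rfl, pv_getD_mk_cons, if_neg (by simp [hb])]
      rw [howner, ih htl hktl]
      have hne : u ≠ p.1 := fun h => he h.symm
      by_cases hc : pvCityIs city p.2 = true <;> simp [hc, hne]

-- ===== VERDICT (by name: the statement is the Claim_ definition above) =====
theorem query_city_genre_spec : Claim_equal_query_city_genre := by
  intro city genre all_users all_albums _hdom hpre
  simp only [Pre_query_city_genre, Bool.and_eq_true] at hpre
  obtain ⟨⟨⟨hu', hb'⟩, hcity'⟩, hgen'⟩ := hpre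
  have hu := (pv_noDup_iff _).mp hu'
  have hb := (pv_noDup_iff _).mp hb'
  have hkeys : ∀ p ∈ all_users, ((p.2.map Prod.fst).contains "city") = true := by
    intro p hp
    have h := (List.all_eq_true.mp hcity') p hp
    simp only [Bool.and_eq_true] at h
    exact h.2
  show query_city_genre city genre all_users all_albums = query_city_genre_alt city genre all_users all_albums
  rw [pv_portA_eq_sum, pv_portB_eq_sum, pv_main city genre all_users hu all_albums hb]
  refine congrArg List.sum (List.map_congr_left ?_)
  intro q hq
  by_cases ho : pvOwnerCity all_users q.1 = some city
  · have hmem : q.1 ∈ pvCityList city all_users :=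
      (pv_owner_iff city all_users hu hkeys q.1).mp ho
    rw [if_pos hmem, if_pos ho]
    unfold pvCnt
    refine congrArg (fun n : Nat => (n : Int)) (List.countP_congr ?_)
    intro alb halb
    have hg := (List.all_eq_true.mp hgen') q hq
    rw [Bool.or_eq_true] at hg
    rcases hg with hg | hg
    · exfalso
      rw [Bool.not_eq_eq_eq_not, Bool.not_true, ← Bool.not_eq_true] at hg
      exact hg (by rw [List.contains_iff_mem]; exact hmem)
    · have halbk := (List.all_eq_true.mp hg) alb halb
      simp only [Bool.and_eq_true] at halbk
      have hcontains : (PySem.Dict.mk alb).contains "genre" = true :=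
        (pv_contains_mk_iff alb "genre").mpr (by
          have h2 := halbk.2
          rwa [List.contains_iff_mem] at h2)
      rw [pv_get?_eq_some_getD alb "genre" "" hcontains]
      unfold pvGenreIs
      cases hcmp : ((PySem.Dict.mk alb).getD "genre" "" == genre)
      · constructor
        · intro h; exact absurd h (by simp)
        · intro hc
          exfalso
          have h2 := beq_iff_eq.mp hc
          rw [Option.some_inj] at h2
          exact (Bool.eq_false_iff.mp hcmp) (beq_iff_eq.mpr h2)
      · exact iff_of_true rfl (beq_iff_eq.mpr (congrArg some (beq_iff_eq.mp hcmp)))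
  · have hmem : q.1 ∉ pvCityList city all_users :=
      fun h => ho ((pv_owner_iff city all_users hu hkeys q.1).mpr h)
    rw [if_neg hmem, if_neg ho]
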